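-- pv_equiv track=rewrite | github.com/Meowbox64/timeTracker | graph.py | _x_axis
-- ===== SOURCE A (Python) =====
-- LABEL_WIDTH   = 4   # chars reserved for y-axis labels (e.g. " 4.0", "-3.5")
--
-- TICK_INTERVAL = 5   # days between x-axis tick marks
--
-- def _x_axis(span: int) -> list:
--     """Two-line x-axis: tick marks and day-offset labels.
--
--     Offsets are relative to today (0 = today = rightmost column).
--     Labels are left-aligned from the tick position.
--     """
--     tick_chars  = [" "] * span
--     label_chars = [" "] * span
--
--     for i in range(span):
--         offset = i - (span - 1)          # 0 at rightmost, negative going left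
--         if offset % TICK_INTERVAL == 0:
--             tick_chars[i] = "│"
--             label = str(offset)
--             for j, ch in enumerate(label):
--                 pos = i + j
--                 if pos < span:
--                     label_chars[pos] = ch
--
--     pad = " " * (LABEL_WIDTH + 1)        # align with inner graph content
--     return [
--         pad + "".join(tick_chars),
--         pad + "".join(label_chars),
--     ]
-- ===== SOURCE B (Python) =====
-- LABEL_WIDTH   = 4   # chars reserved for y-axis labels (e.g. " 4.0", "-3.5")
--
-- TICK_INTERVAL = 5   # days between x-axis tick marks
--
-- def _x_axis(span: int) -> list:
--     """Two-line x-axis: tick marks and day-offset labels.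
--
--     Instead of scanning every column with a modulo test, enumerate the
--     tick columns directly (leftmost tick first) and write each label by
--     slice assignment, clipped at the right edge.
--     """
--     pad = " " * (LABEL_WIDTH + 1)
--     tick_chars  = [" "] * span
--     label_chars = [" "] * span
--
--     first  = (span - 1) % TICK_INTERVAL        # leftmost tick column
--     nticks = (span - 1) // TICK_INTERVAL + 1   # <= 0 when span <= 0
--     for k in range(nticks):
--         i = first + TICK_INTERVAL * k
--         tick_chars[i] = "│"
--         lab = str(i - (span - 1))[: span - i]  # label, clipped at the right edge
--         label_chars[i : i + len(lab)] = list(lab)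
--
--     return [pad + "".join(tick_chars), pad + "".join(label_chars)]
-- ===== Notes on version B (the rewrite author's own statement) =====
-- stated objective: faster
-- what changed: B enumerates the tick columns arithmetically (leftmost tick, then every fifth column) and writes each clipped label by slice assignment, instead of A's scan of every column with a modulo test and per-character guarded writes.
import Mathlib
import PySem

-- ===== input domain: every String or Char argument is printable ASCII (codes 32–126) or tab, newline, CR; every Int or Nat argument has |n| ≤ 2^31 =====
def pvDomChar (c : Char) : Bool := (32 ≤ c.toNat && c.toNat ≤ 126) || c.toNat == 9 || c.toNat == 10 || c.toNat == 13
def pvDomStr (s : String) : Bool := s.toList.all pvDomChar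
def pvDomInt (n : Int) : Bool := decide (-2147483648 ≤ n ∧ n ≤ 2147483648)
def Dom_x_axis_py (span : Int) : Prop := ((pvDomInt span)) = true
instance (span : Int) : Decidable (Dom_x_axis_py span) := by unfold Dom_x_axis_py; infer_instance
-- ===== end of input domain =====

-- B replaces A's scan of every column with a modulo test by direct enumeration of the
-- tick columns and slice-assignment of the clipped labels (objective: faster, measured).

-- ===== PORT A =====
-- literal port of _x_axis: scan every column i, test offset % 5 == 0, set the tick
-- char and write the label char by char (clipped by the pos < span test).
def x_axis_py (span : Int) : List String :=
  let st := (PySem.List.pyRange 0 span 1).foldl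
    (fun (st : List Char × List Char) (i : Int) =>
      if PySem.Int.mod (i - (span - 1)) 5 = 0 then
        -- tick_chars[i] = "│"; for j, ch in enumerate(str(offset)): if pos < span: label_chars[pos] = ch
        -- (both indices are in range here, so Python's item assignment never raises)
        (PySem.List.pySetD st.1 i '│',
         (PySem.List.enumerate (PySem.Int.toChars (i - (span - 1)))).foldl
           (fun (l : List Char) (jc : Int × Char) =>
             if i + jc.1 < span then PySem.List.pySetD l (i + jc.1) jc.2 else l) st.2)
      else st)
    (PySem.List.pyRepeat [' '] span, PySem.List.pyRepeat [' '] span)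
  [String.ofList (List.replicate 5 ' ') ++ String.ofList st.1,
   String.ofList (List.replicate 5 ' ') ++ String.ofList st.2]

-- ===== PORT B =====
-- literal port of Source B: the leftmost tick column is (span-1) % 5 and there are
-- (span-1) // 5 + 1 ticks; each label is clipped by str(...)[: span-i] and written
-- by slice assignment label_chars[i : i+len(lab)] = list(lab).
def x_axis_py_alt (span : Int) : List String :=
  let st := (PySem.List.pyRange 0 (PySem.Int.floordiv (span - 1) 5 + 1) 1).foldl
    (fun (st : List Char × List Char) (k : Int) =>
      (PySem.List.pySetD st.1 (PySem.Int.mod (span - 1) 5 + 5 * k) '│',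
       PySem.List.slice st.2 none (some (PySem.Int.mod (span - 1) 5 + 5 * k)) ++
         PySem.List.slice
           (PySem.Int.toChars (PySem.Int.mod (span - 1) 5 + 5 * k - (span - 1)))
           none (some (span - (PySem.Int.mod (span - 1) 5 + 5 * k))) ++
         PySem.List.slice st.2
           (some (PySem.Int.mod (span - 1) 5 + 5 * k +
             PySem.List.len (PySem.List.slice
               (PySem.Int.toChars (PySem.Int.mod (span - 1) 5 + 5 * k - (span - 1)))
               none (some (span - (PySem.Int.mod (span - 1) 5 + 5 * k)))))) none))
    (PySem.List.pyRepeat [' '] span, PySem.List.pyRepeat [' '] span)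
  [String.ofList (List.replicate 5 ' ') ++ String.ofList st.1,
   String.ofList (List.replicate 5 ' ') ++ String.ofList st.2]

-- ===== PRECONDITION & SPEC =====
def Spec_x_axis_py (span : Int) (out : List String) : Prop := out = x_axis_py_alt span
instance (span : Int) (out : List String) : Decidable (Spec_x_axis_py span out) := by unfold Spec_x_axis_py; infer_instance

-- ===== CLAIM (what is proved, stated in full; the proofs are below) =====
def Claim_equal_x_axis_py : Prop := ∀ (span : Int), Dom_x_axis_py span → Spec_x_axis_py span (x_axis_py span)

-- ===== LEMMAS AND PROOFS =====

/-- Writing the characters of `lab` one by one from position `i`, skipping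
positions `≥ N` — the common shape of both ports' label writes. -/
def writeFrom (N : Nat) : List Char → Nat → List Char → List Char
  | l, _, [] => l
  | l, i, c :: cs => writeFrom N (if i < N then l.set i c else l) (i + 1) cs

theorem writeFrom_length (N : Nat) (lab : List Char) :
    ∀ (l : List Char) (i : Nat), (writeFrom N l i lab).length = l.length := by
  induction lab with
  | nil => intro l i; rfl
  | cons c cs ih =>
    intro l i
    show (writeFrom N (if i < N then l.set i c else l) (i + 1) cs).length = _
    rw [ih]; split <;> simp

theorem writeFrom_of_ge (N : Nat) (lab : List Char) :
    ∀ (l : List Char) (i : Nat), N ≤ i → writeFrom N l i lab = l := by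
  induction lab with
  | nil => intro l i _; rfl
  | cons c cs ih =>
    intro l i h
    show writeFrom N (if i < N then l.set i c else l) (i + 1) cs = l
    rw [if_neg (by omega)]
    exact ih l (i + 1) (by omega)

/-- A's inner loop (enumerate + guarded item assignment) is `writeFrom`. -/
theorem enumFold (N : Int) (hN : 0 ≤ N) (lab : List Char) :
    ∀ (l : List Char) (i s : Int), 0 ≤ i + s →
    (PySem.List.enumerate lab s).foldl
      (fun (acc : List Char) (jc : Int × Char) =>
        if i + jc.1 < N then PySem.List.pySetD acc (i + jc.1) jc.2 else acc) l
    = writeFrom N.toNat l (i + s).toNat lab := by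
  induction lab with
  | nil => intro l i s _; rfl
  | cons c cs ih =>
    intro l i s h
    have hcons : PySem.List.enumerate (c :: cs) s = (s, c) :: PySem.List.enumerate cs (s + 1) := rfl
    rw [hcons, List.foldl_cons]
    have hstep : (if i + s < N then PySem.List.pySetD l (i + s) c else l)
        = (if (i + s).toNat < N.toNat then l.set (i + s).toNat c else l) := by
      by_cases hc : i + s < N
      · rw [if_pos hc, if_pos (by omega), PySem.List.pySetD_of_nonneg _ _ h]
      · rw [if_neg hc, if_neg (by omega)]
    rw [hstep, ih _ i (s + 1) (by omega)]
    have harg : (i + (s + 1)).toNat = (i + s).toNat + 1 := by omega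
    rw [harg]
    rfl

/-- `writeFrom` as a splice: prefix kept, clipped label, suffix kept. -/
theorem spliceWrite (lab : List Char) :
    ∀ (N : Nat) (l : List Char) (i : Nat), l.length = N → i ≤ N →
    writeFrom N l i lab
      = l.take i ++ lab.take (N - i) ++ l.drop (i + min lab.length (N - i)) := by
  induction lab with
  | nil =>
    intro N l i hl hi
    simp [writeFrom, List.take_append_drop]
  | cons c cs ih =>
    intro N l i hl hi
    show writeFrom N (if i < N then l.set i c else l) (i + 1) cs = _
    by_cases hlt : i < N
    · rw [if_pos hlt]
      rw [ih N (l.set i c) (i + 1) (by simp [hl]) (by omega)]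
      have htake : (l.set i c).take (i + 1) = l.take i ++ [c] := by
        rw [List.take_add_one, List.take_set, List.getElem?_set_self (by omega),
          List.set_eq_of_length_le (by simp)]
        simp
      have hdrop : ∀ m : Nat, (l.set i c).drop (i + 1 + m) = l.drop (i + 1 + m) := by
        intro m; exact List.drop_set_of_lt (by omega)
      have hN1 : N - i = (N - (i + 1)) + 1 := by omega
      have hmin : min (c :: cs).length (N - i) = min cs.length (N - (i + 1)) + 1 := by
        simp; omega
      have hidx : i + 1 + min cs.length (N - (i + 1)) = i + (min cs.length (N - (i + 1)) + 1) := by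
        omega
      rw [htake, hdrop, hmin, hN1, List.take_succ_cons, hidx]
      simp [List.append_assoc]
    · rw [if_neg hlt]
      have hieq : i = N := by omega
      rw [writeFrom_of_ge N cs l (i + 1) (by omega)]
      subst hieq
      simp [hl, List.take_of_length_le (le_of_eq hl)]

/-- foldl congruence with an invariant carried through the fold. -/
theorem foldl_inv {α σ : Type} (P : σ → Prop) (f g : σ → α → σ) :
    ∀ (l : List α) (s : σ), P s →
    (∀ t a, a ∈ l → P t → P (f t a)) →
    (∀ t a, a ∈ l → P t → f t a = g t a) →
    l.foldl f s = l.foldl g s := by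
  intro l
  induction l with
  | nil => intro s _ _ _; rfl
  | cons a as ih =>
    intro s hs hpres heq
    simp only [List.foldl_cons]
    rw [← heq s a (by simp) hs]
    exact ih (f s a) (hpres s a (by simp) hs)
      (fun t b hb ht => hpres t b (by simp [hb]) ht)
      (fun t b hb ht => heq t b (by simp [hb]) ht)

/-- The columns A's modulo test selects are exactly B's arithmetically
enumerated tick columns, in the same (ascending) order. -/
theorem ticks_eq (span : Int) :
    (PySem.List.pyRange 0 span 1).filter
      (fun i => decide (PySem.Int.mod (i - (span - 1)) 5 = 0))
    = (PySem.List.pyRange 0 (PySem.Int.floordiv (span - 1) 5 + 1) 1).map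
        (fun k => PySem.Int.mod (span - 1) 5 + 5 * k) := by
  have hq : PySem.Int.floordiv (span - 1) 5 * 5 + PySem.Int.mod (span - 1) 5 = span - 1 :=
    PySem.Int.floordiv_mul_add_mod (span - 1) 5
  have hr0 : 0 ≤ PySem.Int.mod (span - 1) 5 := PySem.Int.mod_nonneg _ (by omega)
  have hr5 : PySem.Int.mod (span - 1) 5 < 5 := PySem.Int.mod_lt _ (by omega)
  set q := PySem.Int.floordiv (span - 1) 5 with hqdef
  set r := PySem.Int.mod (span - 1) 5 with hrdef
  have hpw1 : ((PySem.List.pyRange 0 span 1).filter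
      (fun i => decide (PySem.Int.mod (i - (span - 1)) 5 = 0))).Pairwise (· < ·) :=
    (PySem.List.pairwise_lt_pyRange_one 0 span).filter _
  have hpw2 : ((PySem.List.pyRange 0 (q + 1) 1).map (fun k => r + 5 * k)).Pairwise (· < ·) :=
    (PySem.List.pairwise_lt_pyRange_one 0 (q + 1)).map _ (fun a b hab => by omega)
  have hmem : ∀ x, (x ∈ (PySem.List.pyRange 0 span 1).filter
      (fun i => decide (PySem.Int.mod (i - (span - 1)) 5 = 0)))
      ↔ x ∈ (PySem.List.pyRange 0 (q + 1) 1).map (fun k => r + 5 * k) := by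
    intro x
    simp only [List.mem_filter, PySem.List.mem_pyRange_one, List.mem_map,
      decide_eq_true_eq, PySem.Int.mod_eq_zero_iff_dvd]
    constructor
    · rintro ⟨⟨hx0, hxs⟩, m, hm⟩
      exact ⟨q + m, ⟨by omega, by omega⟩, by omega⟩
    · rintro ⟨k, ⟨hk0, hk1⟩, rfl⟩
      exact ⟨⟨by omega, by omega⟩, k - q, by omega⟩
  exact List.eq_of_perm_of_sorted
    (fun a b _ _ h h' => absurd (h.trans h') (lt_irrefl a))
    hpw1 hpw2
    ((List.perm_ext_iff_of_nodup
      (hpw1.imp (fun h => ne_of_lt h)) (hpw2.imp (fun h => ne_of_lt h))).mpr hmem)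

/-- The two fold states coincide. -/
theorem state_eq (span : Int) :
    (PySem.List.pyRange 0 span 1).foldl
      (fun (st : List Char × List Char) (i : Int) =>
        if PySem.Int.mod (i - (span - 1)) 5 = 0 then
          (PySem.List.pySetD st.1 i '│',
           (PySem.List.enumerate (PySem.Int.toChars (i - (span - 1)))).foldl
             (fun (l : List Char) (jc : Int × Char) =>
               if i + jc.1 < span then PySem.List.pySetD l (i + jc.1) jc.2 else l) st.2)
        else st)
      (PySem.List.pyRepeat [' '] span, PySem.List.pyRepeat [' '] span)
    = (PySem.List.pyRange 0 (PySem.Int.floordiv (span - 1) 5 + 1) 1).foldl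
      (fun (st : List Char × List Char) (k : Int) =>
        (PySem.List.pySetD st.1 (PySem.Int.mod (span - 1) 5 + 5 * k) '│',
         PySem.List.slice st.2 none (some (PySem.Int.mod (span - 1) 5 + 5 * k)) ++
           PySem.List.slice
             (PySem.Int.toChars (PySem.Int.mod (span - 1) 5 + 5 * k - (span - 1)))
             none (some (span - (PySem.Int.mod (span - 1) 5 + 5 * k))) ++
           PySem.List.slice st.2
             (some (PySem.Int.mod (span - 1) 5 + 5 * k +
               PySem.List.len (PySem.List.slice
                 (PySem.Int.toChars (PySem.Int.mod (span - 1) 5 + 5 * k - (span - 1)))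
                 none (some (span - (PySem.Int.mod (span - 1) 5 + 5 * k)))))) none))
      (PySem.List.pyRepeat [' '] span, PySem.List.pyRepeat [' '] span) := by
  rw [PySem.List.foldl_ite_eq_foldl_filter
    (p := fun i => PySem.Int.mod (i - (span - 1)) 5 = 0)
    (f := fun (st : List Char × List Char) (i : Int) =>
      (PySem.List.pySetD st.1 i '│',
       (PySem.List.enumerate (PySem.Int.toChars (i - (span - 1)))).foldl
         (fun (l : List Char) (jc : Int × Char) =>
           if i + jc.1 < span then PySem.List.pySetD l (i + jc.1) jc.2 else l) st.2))]
  rw [ticks_eq span, List.foldl_map]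
  have hq : PySem.Int.floordiv (span - 1) 5 * 5 + PySem.Int.mod (span - 1) 5 = span - 1 :=
    PySem.Int.floordiv_mul_add_mod (span - 1) 5
  have hr0 : 0 ≤ PySem.Int.mod (span - 1) 5 := PySem.Int.mod_nonneg _ (by omega)
  have hr5 : PySem.Int.mod (span - 1) 5 < 5 := PySem.Int.mod_lt _ (by omega)
  set q := PySem.Int.floordiv (span - 1) 5 with hqdef
  set r := PySem.Int.mod (span - 1) 5 with hrdef
  refine foldl_inv (fun st : List Char × List Char => st.2.length = span.toNat) _ _ _ _
    (by simp [PySem.List.pyRepeat_singleton]) ?_ ?_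
  · -- the A-side body preserves the length of the label row
    intro t k hk ht
    dsimp only
    have hk' : 0 ≤ k ∧ k < q + 1 := PySem.List.mem_pyRange_one.mp hk
    rw [enumFold span (by omega) _ t.2 (r + 5 * k) 0 (by omega)]
    rw [writeFrom_length]
    exact ht
  · -- on a tick column the two bodies agree
    intro t k hk ht
    have hk' : 0 ≤ k ∧ k < q + 1 := PySem.List.mem_pyRange_one.mp hk
    have hi0 : 0 ≤ r + 5 * k := by omega
    have his : r + 5 * k < span := by omega
    rw [enumFold span (by omega) _ t.2 (r + 5 * k) 0 (by omega)]
    set lab := PySem.Int.toChars (r + 5 * k - (span - 1)) with hlab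
    rw [spliceWrite lab span.toNat t.2 (r + 5 * k + 0).toNat ht (by omega)]
    rw [PySem.List.slice_to _ (by omega : (0:Int) ≤ r + 5 * k),
        PySem.List.slice_to _ (by omega : (0:Int) ≤ span - (r + 5 * k))]
    rw [PySem.List.slice_from _ (by
      have := PySem.List.len_eq (lab.take (span - (r + 5 * k)).toNat)
      omega)]
    have e1 : (r + 5 * k + 0).toNat = (r + 5 * k).toNat := by omega
    have e2 : (span - (r + 5 * k)).toNat = span.toNat - (r + 5 * k).toNat := by omega
    have e3 : (r + 5 * k + PySem.List.len (lab.take (span.toNat - (r + 5 * k).toNat))).toNat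
        = (r + 5 * k).toNat + min lab.length (span.toNat - (r + 5 * k).toNat) := by
      rw [PySem.List.len_eq, List.length_take]
      omega
    rw [e1, e2, e3]

theorem main_eq (span : Int) : x_axis_py span = x_axis_py_alt span := by
  unfold x_axis_py x_axis_py_alt
  rw [state_eq span]

-- ===== VERDICT (by name: the statement is the Claim_ definition above) =====
theorem x_axis_py_spec : Claim_equal_x_axis_py := by
  intro span _
  exact main_eq span
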